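-- pv_equiv track=rewrite | github.com/Gunther-Schulz/sd-webui-prompt-enhancer | src/anima_tagger/scripts/ab_tests.py | dedup_by_stem
-- ===== SOURCE A (Python) =====
-- def dedup_by_stem(names: list[str]) -> list[str]:
--     """Collapse names sharing a stem (part before '(' or an obvious
--     disambiguation suffix). Keeps the shortest variant per stem."""
--     by_stem: dict[str, str] = {}
--     order: list[str] = []
--     for n in names:
--         # Strip parenthesized suffix: "rococo (girl cafe gun)" → "rococo"
--         stem = n.split(" (")[0].strip()
--         # Collapse repeated words at end ("hatsune miku (nt)" → "hatsune miku")
--         if stem not in by_stem or len(n) < len(by_stem[stem]):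
--             if stem not in by_stem:
--                 order.append(stem)
--             by_stem[stem] = n
--     return [by_stem[s] for s in order]
-- ===== SOURCE B (Python) =====
-- def dedup_by_stem(names: list[str]) -> list[str]:
--     """Group all names by stem, then take the shortest (earliest on ties) of each group,
--     in order of each stem's first appearance."""
--     stems = [n.split(" (")[0].strip() for n in names]
--     groups: dict[str, list[str]] = {}
--     for s, n in zip(stems, names):
--         groups.setdefault(s, []).append(n)
--     return [min(groups[s], key=len) for s in dict.fromkeys(stems)]
-- ===== Notes on version B (the rewrite author's own statement) =====
-- stated objective: alternative
-- what changed: A keeps a running shortest-so-far name per stem in one pass; B first groups all names by stem (setdefault/append) and then takes min(key=len) of each group over the deduplicated stem list.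
import Mathlib
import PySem

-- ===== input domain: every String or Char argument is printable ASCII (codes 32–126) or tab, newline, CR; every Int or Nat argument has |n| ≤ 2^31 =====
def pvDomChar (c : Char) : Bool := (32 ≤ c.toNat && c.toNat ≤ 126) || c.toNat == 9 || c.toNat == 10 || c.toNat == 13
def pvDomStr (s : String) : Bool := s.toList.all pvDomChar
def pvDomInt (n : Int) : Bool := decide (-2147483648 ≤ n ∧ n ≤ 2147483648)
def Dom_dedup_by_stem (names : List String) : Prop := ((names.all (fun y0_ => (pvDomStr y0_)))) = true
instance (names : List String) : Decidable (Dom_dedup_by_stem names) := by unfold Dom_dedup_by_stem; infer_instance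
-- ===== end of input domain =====

-- B replaces A's single running-shortest pass by: group all names per stem, then take
-- min(key=len) of each group over the deduplicated stem list (objective: alternative).

-- ===== PORT A =====
-- stem = n.split(" (")[0].strip()  — the identical line occurs in both Pythons.
-- split? is none only for an empty separator and Python's split always returns a
-- nonempty list, so neither default below is ever used.
def pvStem (n : String) : String :=
  PySem.Str.strip (((PySem.Str.split? n " (").getD []).headD "")

-- the body of A's for-loop, acting on the state (by_stem, order)
def pvStepA (acc : PySem.Dict String String × List String) (n : String) :
    PySem.Dict String String × List String :=
  let stem := pvStem n
  if !(acc.1.contains stem) || decide (PySem.Str.len n < PySem.Str.len (acc.1.getD stem "")) then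
    (acc.1.insert stem n, if !(acc.1.contains stem) then acc.2 ++ [stem] else acc.2)
  else acc

def dedup_by_stem (names : List String) : List String :=
  let st := names.foldl pvStepA (PySem.Dict.empty, [])
  -- by_stem[s]: every s in order is a key of by_stem, so getD's default is never used
  st.2.map (fun s => st.1.getD s "")

-- ===== PORT B =====
def dedup_by_stem_alt (names : List String) : List String :=
  let stems := names.map pvStem
  -- groups.setdefault(s, []).append(n)  ==  groups[s] = groups.get(s, []) + [n]  ==  Dict.modify
  let groups := (stems.zip names).foldl
    (fun (d : PySem.Dict String (List String)) p => d.modify p.1 [] (· ++ [p.2]))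
    PySem.Dict.empty
  -- dict.fromkeys(stems) is PySem.List.dedup; min(groups[s], key=len) is min?: the group
  -- of a stem drawn from stems is nonempty, so neither .getD default is ever used
  (PySem.List.dedup stems).map
    (fun s => (PySem.List.min? (groups.getD s []) PySem.Str.len).getD "")

-- ===== PRECONDITION & SPEC =====
def Spec_dedup_by_stem (names : List String) (out : List String) : Prop := out = dedup_by_stem_alt names
instance (names : List String) (out : List String) : Decidable (Spec_dedup_by_stem names out) := by unfold Spec_dedup_by_stem; infer_instance

-- ===== CLAIM (what is proved, stated in full; the proofs are below) =====
def Claim_equal_dedup_by_stem : Prop := ∀ (names : List String), Dom_dedup_by_stem names → Spec_dedup_by_stem names (dedup_by_stem names)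

-- ===== LEMMAS AND PROOFS =====

-- the step function of PySem.List.min? with key PySem.Str.len, as a named definition
def pvMinStep (acc : Option String) (n : String) : Option String :=
  match acc with
  | none => some n
  | some m => if PySem.Str.len n < PySem.Str.len m then some n else some m

theorem pvMin?_eq_foldl (l : List String) :
    PySem.List.min? l PySem.Str.len = l.foldl pvMinStep none := by
  unfold PySem.List.min?
  exact PySem.List.foldl_congr_mem l _ pvMinStep none (fun acc x _ => by cases acc <;> rfl)

-- A's dict entry at stem s is the min?-fold over the names whose stem is s
theorem pvFoldA_get? (names : List String) (d : PySem.Dict String String)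
    (ord : List String) (s : String) :
    ((names.foldl pvStepA (d, ord)).1).get? s =
      (names.filter (fun n => pvStem n == s)).foldl pvMinStep (d.get? s) := by
  induction names generalizing d ord with
  | nil => rfl
  | cons n t ih =>
    rw [List.foldl_cons, List.filter_cons]
    by_cases hc : d.contains (pvStem n) = true
    · obtain ⟨cur, hcur⟩ : ∃ cur, d.get? (pvStem n) = some cur := by
        have := PySem.Dict.contains_eq_isSome_get? (d := d) (k := pvStem n)
        rw [hc] at this
        exact Option.isSome_iff_exists.mp this.symm
      have hgetD : d.getD (pvStem n) "" = cur :=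
        PySem.Dict.getD_of_get?_eq_some d "" hcur
      by_cases hlt : n.length < cur.length
      · have hstep : pvStepA (d, ord) n = (d.insert (pvStem n) n, ord) := by
          simp [pvStepA, hc, hgetD, hlt]
        rw [hstep, ih]
        by_cases hs : pvStem n = s
        · subst hs
          simp [PySem.Dict.get?_insert_self, hcur, pvMinStep, hlt, List.foldl_cons]
        · rw [PySem.Dict.get?_insert_of_ne _ _ (by exact fun h => hs h.symm)]
          simp [hs]
      · have hstep : pvStepA (d, ord) n = (d, ord) := by
          simp [pvStepA, hc, hgetD, hlt]
        rw [hstep, ih]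
        by_cases hs : pvStem n = s
        · subst hs
          simp [hcur, pvMinStep, hlt]
        · simp [hs]
    · have hnone : d.get? (pvStem n) = none := by
        have h2 := PySem.Dict.contains_eq_isSome_get? (d := d) (k := pvStem n)
        rw [h2] at hc
        simpa using hc
      have hstep : pvStepA (d, ord) n = (d.insert (pvStem n) n, ord ++ [pvStem n]) := by
        simp [pvStepA, hc]
      rw [hstep, ih]
      by_cases hs : pvStem n = s
      · subst hs
        simp [PySem.Dict.get?_insert_self, hnone, pvMinStep]
      · rw [PySem.Dict.get?_insert_of_ne _ _ (by exact fun h => hs h.symm)]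
        simp [hs]

-- A's order list is ord extended by the new stems, in order of first appearance
theorem pvFoldA_order (names : List String) (d : PySem.Dict String String)
    (ord : List String) (hsync : ∀ s : String, d.contains s = decide (s ∈ ord)) :
    (names.foldl pvStepA (d, ord)).2 = PySem.Set.update ord (names.map pvStem) := by
  induction names generalizing d ord with
  | nil => rfl
  | cons n t ih =>
    rw [List.foldl_cons, List.map_cons, PySem.Set.update_cons]
    by_cases hc : d.contains (pvStem n) = true
    · have hmem : pvStem n ∈ ord := by
        have := hsync (pvStem n); rw [hc] at this; simpa using this.symm
      rw [PySem.Set.add_of_mem hmem]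
      obtain ⟨cur, hcur⟩ : ∃ cur, d.get? (pvStem n) = some cur := by
        have h2 := PySem.Dict.contains_eq_isSome_get? (d := d) (k := pvStem n)
        rw [hc] at h2
        exact Option.isSome_iff_exists.mp h2.symm
      have hgetD : d.getD (pvStem n) "" = cur := PySem.Dict.getD_of_get?_eq_some d "" hcur
      have hsync' : ∀ s : String, (d.insert (pvStem n) n).contains s = decide (s ∈ ord) := by
        intro s
        rw [PySem.Dict.contains_insert]
        by_cases hs : s = pvStem n
        · simp [hs, hmem]
        · simp [hs, hsync s]
      by_cases hlt : n.length < cur.length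
      · have hstep : pvStepA (d, ord) n = (d.insert (pvStem n) n, ord) := by
          simp [pvStepA, hc, hgetD, hlt]
        rw [hstep]
        exact ih _ _ hsync'
      · have hstep : pvStepA (d, ord) n = (d, ord) := by
          simp [pvStepA, hc, hgetD, hlt]
        rw [hstep]
        exact ih _ _ hsync
    · have hmem : pvStem n ∉ ord := by
        have h3 := hsync (pvStem n)
        rw [h3] at hc
        simpa using hc
      rw [PySem.Set.add_of_not_mem hmem]
      have hstep : pvStepA (d, ord) n = (d.insert (pvStem n) n, ord ++ [pvStem n]) := by
        simp [pvStepA, hc]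
      rw [hstep]
      apply ih
      intro s
      rw [PySem.Dict.contains_insert]
      by_cases hs : s = pvStem n
      · simp [hs]
      · simp [hs, hsync s]

-- B's group of stem s collects exactly the names whose stem is s
theorem pvZipFilter (names : List String) (s : String) :
    ((((names.map pvStem).zip names).filter (fun p => p.1 == s)).map (·.2)) =
      names.filter (fun n => pvStem n == s) := by
  induction names with
  | nil => rfl
  | cons n t ih =>
    by_cases h : pvStem n == s <;> simp [h, ih]

-- ===== VERDICT (by name: the statement is the Claim_ definition above) =====
theorem dedup_by_stem_spec : Claim_equal_dedup_by_stem := by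
  intro names _
  unfold Spec_dedup_by_stem dedup_by_stem dedup_by_stem_alt
  dsimp only
  have horder : (names.foldl pvStepA (PySem.Dict.empty, [])).2
      = PySem.List.dedup (names.map pvStem) := by
    rw [pvFoldA_order names PySem.Dict.empty [] (by intro s; simp)]
    rw [PySem.List.dedup_eq_ofList]
    rfl
  rw [horder]
  apply List.map_congr_left
  intro s _
  rw [PySem.Dict.getD_eq_get?_getD, pvFoldA_get? names _ [] s,
    PySem.Dict.getD_foldl_modify_append, pvZipFilter]
  simp [pvMin?_eq_foldl]
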